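-- pv_equiv track=rewrite | github.com/maggotspawn/Emoji | emoji_stego_android.py | text_to_tags
-- ===== SOURCE A (Python) =====
-- TAG_BASE = 0xE0000
--
-- def text_to_tags(text):
--     """Convert ANY text to invisible tag characters."""
--     utf8_bytes = text.encode('utf-8')
--     result = []
--     for byte in utf8_bytes:
--         high = (byte >> 4) & 0x0F
--         low = byte & 0x0F
--         result.append(chr(TAG_BASE + high))
--         result.append(chr(TAG_BASE + low))
--     return ''.join(result)
-- ===== SOURCE B (Python) =====
-- TAG_BASE = 0xE0000
--
-- def text_to_tags(text):
--     """Convert ANY text to invisible tag characters."""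
--     hx = text.encode('utf-8').hex()
--     return ''.join(chr(TAG_BASE + int(c, 16)) for c in hx)
-- ===== Notes on version B (the rewrite author's own statement) =====
-- stated objective: idiomatic
-- what changed: B replaces the bit-shift/mask nibble extraction with a hex-string intermediate (bytes.hex()) and maps each hex digit back to a tag char, instead of appending two computed chars per byte.
import Mathlib
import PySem

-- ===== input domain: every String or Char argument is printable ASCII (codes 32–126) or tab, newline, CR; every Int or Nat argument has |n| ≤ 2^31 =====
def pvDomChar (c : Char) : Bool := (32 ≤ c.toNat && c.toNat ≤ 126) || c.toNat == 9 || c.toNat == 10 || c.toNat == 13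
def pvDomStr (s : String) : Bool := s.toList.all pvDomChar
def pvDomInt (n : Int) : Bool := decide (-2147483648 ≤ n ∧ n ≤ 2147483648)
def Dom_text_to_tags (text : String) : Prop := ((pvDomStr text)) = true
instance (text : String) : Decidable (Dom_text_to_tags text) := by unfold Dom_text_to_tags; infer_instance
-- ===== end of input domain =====

-- B replaces A's bit-shift/mask nibble extraction with a hex-string intermediate
-- (bytes.hex()) mapped digit-by-digit back to tag characters; objective: idiomatic.

-- ===== PORT A =====
-- text.encode('utf-8') ported as the list of code points: exact on the ASCII Dom (all codes ≤ 126).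
def text_to_tags (text : String) : String :=
  let utf8Bytes : List Nat := text.toList.map (fun c => c.toNat)
  String.mk (utf8Bytes.foldl (fun result byte =>
    let high := (byte >>> 4) &&& 0x0F
    let low := byte &&& 0x0F
    result ++ [Char.ofNat (0xE0000 + high), Char.ofNat (0xE0000 + low)]) [])

-- ===== PORT B =====
-- bytes.hex(): two lowercase hex digits per byte (hand port, exact on bytes < 256).
def hexDigitChar (n : Nat) : Char := if n < 10 then Char.ofNat (48 + n) else Char.ofNat (87 + n)
-- int(c, 16) for a lowercase hex digit character (hand port, exact on '0'-'9','a'-'f').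
def hexVal (c : Char) : Nat := if 97 ≤ c.toNat then c.toNat - 87 else c.toNat - 48
def text_to_tags_alt (text : String) : String :=
  let hx : List Char := text.toList.flatMap (fun c => [hexDigitChar (c.toNat / 16), hexDigitChar (c.toNat % 16)])
  String.mk (hx.map (fun c => Char.ofNat (0xE0000 + hexVal c)))

-- ===== PRECONDITION & SPEC =====
def Spec_text_to_tags (text : String) (out : String) : Prop := out = text_to_tags_alt text
instance (text : String) (out : String) : Decidable (Spec_text_to_tags text out) := by unfold Spec_text_to_tags; infer_instance

-- ===== CLAIM (what is proved, stated in full; the proofs are below) =====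
def Claim_equal_text_to_tags : Prop := ∀ (text : String), Dom_text_to_tags text → Spec_text_to_tags text (text_to_tags text)

-- ===== LEMMAS AND PROOFS =====

-- per-byte agreement of the two nibble encodings, for every ASCII byte
theorem pv_byte_key : ∀ b < 127,
    hexVal (hexDigitChar (b / 16)) = (b >>> 4) &&& 0x0F ∧
    hexVal (hexDigitChar (b % 16)) = b &&& 0x0F := by decide

theorem pv_chunk_eq (c : Char) (hc : pvDomChar c = true) :
    [Char.ofNat (0xE0000 + ((c.toNat >>> 4) &&& 0x0F)), Char.ofNat (0xE0000 + (c.toNat &&& 0x0F))]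
    = List.map (fun d => Char.ofNat (0xE0000 + hexVal d))
        [hexDigitChar (c.toNat / 16), hexDigitChar (c.toNat % 16)] := by
  have hb : c.toNat < 127 := by
    simp [pvDomChar] at hc; omega
  obtain ⟨h1, h2⟩ := pv_byte_key c.toNat hb
  simp [h1, h2]

theorem pv_list_eq (l : List Char) (h : l.all pvDomChar = true) :
    l.flatMap (fun c =>
      [Char.ofNat (0xE0000 + ((c.toNat >>> 4) &&& 0x0F)), Char.ofNat (0xE0000 + (c.toNat &&& 0x0F))])
    = List.map (fun d => Char.ofNat (0xE0000 + hexVal d))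
        (l.flatMap (fun c => [hexDigitChar (c.toNat / 16), hexDigitChar (c.toNat % 16)])) := by
  induction l with
  | nil => simp
  | cons c t ih =>
    simp only [List.all_cons, Bool.and_eq_true] at h
    simp only [List.flatMap_cons, List.map_append, ← ih h.2, pv_chunk_eq c h.1]

-- ===== VERDICT (by name: the statement is the Claim_ definition above) =====
theorem text_to_tags_spec : Claim_equal_text_to_tags := by
  intro text hdom
  unfold Spec_text_to_tags text_to_tags text_to_tags_alt
  have hfold := PySem.List.foldl_append_eq_flatMap
    (fun b : Nat => [Char.ofNat (0xE0000 + ((b >>> 4) &&& 0x0F)), Char.ofNat (0xE0000 + (b &&& 0x0F))])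
    (text.toList.map (fun c => c.toNat)) []
  simp only [hfold, List.nil_append, List.flatMap_map]
  exact congrArg String.mk (pv_list_eq text.toList hdom)
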